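-- pv_equiv track=rewrite | github.com/grimefr/Veillanalyse | analyzers/topic_analyzer.py | _create_seed_labels
-- ===== SOURCE A (Python) =====
-- from typing import Optional, List, Dict, Any, Tuple, Union
--
-- def _create_seed_labels(
--
--     texts: List[str],
--     seed_topics: List[List[str]]
-- ) -> List[int]:
--     """Crée des labels pour le guided topic modeling."""
--     labels = [-1] * len(texts)
--
--     for i, text in enumerate(texts):
--         text_lower = text.lower()
--         for topic_idx, keywords in enumerate(seed_topics):
--             if any(kw.lower() in text_lower for kw in keywords):
--                 labels[i] = topic_idx
--                 break
--
--     return labels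
-- ===== SOURCE B (Python) =====
-- def _create_seed_labels(texts, seed_topics):
--     # Topic-major worklist: sweep the topics in order over a shrinking worklist of
--     # still-unlabeled texts.  A text matched by the current topic is stamped with
--     # that topic's index and leaves the worklist, so it can never be relabeled by
--     # a later topic -- exactly the first-match semantics.  Stops as soon as the
--     # worklist is empty; each keyword is lowercased once per topic, each text once.
--     labels = [-1] * len(texts)
--     pending = list(enumerate(t.lower() for t in texts))
--     for topic_idx, keywords in enumerate(seed_topics):
--         if not pending:
--             break
--         kws = [kw.lower() for kw in keywords]
--         still = []
--         for i, tl in pending: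
--             if any(kw in tl for kw in kws):
--                 labels[i] = topic_idx
--             else:
--                 still.append((i, tl))
--         pending = still
--     return labels
-- ===== Notes on version B (the rewrite author's own statement) =====
-- stated objective: alternative
-- what changed: B inverts the loop nesting into a topic-major worklist: it sweeps the topics in order over a shrinking list of still-unlabeled (index, lowercased text) pairs, stamping and removing matched texts and stopping when the worklist empties, instead of A's text-major scan that walks the topics with a break per text; keywords are lowercased once per topic instead of once per text and matched texts drop out of later sweeps.
import Mathlib
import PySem

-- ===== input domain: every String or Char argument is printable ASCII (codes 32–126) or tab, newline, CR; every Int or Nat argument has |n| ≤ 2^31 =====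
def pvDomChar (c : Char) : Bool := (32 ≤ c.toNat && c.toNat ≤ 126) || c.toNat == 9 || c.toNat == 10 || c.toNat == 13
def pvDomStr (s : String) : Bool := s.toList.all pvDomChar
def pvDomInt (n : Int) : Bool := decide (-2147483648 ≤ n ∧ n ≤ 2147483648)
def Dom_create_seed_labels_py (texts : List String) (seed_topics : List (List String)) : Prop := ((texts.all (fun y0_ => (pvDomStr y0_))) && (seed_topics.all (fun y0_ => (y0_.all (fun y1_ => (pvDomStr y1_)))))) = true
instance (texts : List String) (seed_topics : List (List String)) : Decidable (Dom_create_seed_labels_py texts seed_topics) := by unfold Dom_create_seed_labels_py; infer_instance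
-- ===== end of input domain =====

-- B inverts the loop nesting into a topic-major worklist: topics in order sweep a shrinking list
-- of still-unlabeled (index, lowered text) pairs, stamping and removing matched texts and stopping
-- when the worklist empties, instead of A's text-major scan with a per-text break
-- (objective: alternative; keywords are lowercased once per topic instead of once per text).


-- ===== PORT A =====
-- inner 'for topic_idx, keywords in enumerate(seed_topics): if any(...): labels[i] = topic_idx; break'
def pvLabelA (tl : String) : List (Int × List String) → Option Int
  | [] => none
  | (ti, kws) :: rest =>
    if kws.any (fun kw => PySem.Str.isIn (PySem.Str.lower kw) tl) then some ti
    else pvLabelA tl rest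

def create_seed_labels_py (texts : List String) (seed_topics : List (List String)) : List Int :=
  let labels := List.replicate texts.length (-1 : Int)
  (PySem.List.enumerate texts 0).foldl
    (fun labels p =>
      let text_lower := PySem.Str.lower p.2
      match pvLabelA text_lower (PySem.List.enumerate seed_topics 0) with
      | some ti => labels.set p.1.toNat ti   -- i from enumerate is a nonnegative in-range index
      | none => labels)
    labels

-- ===== PORT B =====
-- body of B's inner 'for i, tl in pending' loop: stamp a matching text, or keep it on the worklist
def pvStep (ti : Int) (kl : List String) (st : List Int × List (Int × String)) (q : Int × String) :
    List Int × List (Int × String) :=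
  if kl.any (fun kw => PySem.Str.isIn kw q.2) then (st.1.set q.1.toNat ti, st.2)
  else (st.1, st.2 ++ [q])

-- B's outer 'for topic_idx, keywords in enumerate(seed_topics)' loop with the 'if not pending: break'
def pvOuterB : List (Int × List String) → List Int → List (Int × String) → List Int
  | [], labels, _ => labels
  | (ti, kws) :: rest, labels, pending =>
    if pending.isEmpty then labels
    else
      let kl := kws.map PySem.Str.lower
      let r := pending.foldl (pvStep ti kl) (labels, ([] : List (Int × String)))
      pvOuterB rest r.1 r.2

def create_seed_labels_py_alt (texts : List String) (seed_topics : List (List String)) : List Int :=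
  let labels := List.replicate texts.length (-1 : Int)
  let pending := PySem.List.enumerate (texts.map PySem.Str.lower) 0
  pvOuterB (PySem.List.enumerate seed_topics 0) labels pending

-- ===== PRECONDITION & SPEC =====
def Spec_create_seed_labels_py (texts : List String) (seed_topics : List (List String)) (out : List Int) : Prop := out = create_seed_labels_py_alt texts seed_topics
instance (texts : List String) (seed_topics : List (List String)) (out : List Int) : Decidable (Spec_create_seed_labels_py texts seed_topics out) := by unfold Spec_create_seed_labels_py; infer_instance

-- ===== CLAIM (what is proved, stated in full; the proofs are below) =====
def Claim_equal_create_seed_labels_py : Prop := ∀ (texts : List String) (seed_topics : List (List String)), Dom_create_seed_labels_py texts seed_topics → Spec_create_seed_labels_py texts seed_topics (create_seed_labels_py texts seed_topics)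

-- ===== LEMMAS AND PROOFS =====

-- per-text value A computes: the first matching topic index, default -1
def pvG (st : List (List String)) (t : String) : Int :=
  (pvLabelA (PySem.Str.lower t) (PySem.List.enumerate st 0)).getD (-1)

lemma set_append_cons {α : Type} (pre : List α) (x v : α) (rest : List α) :
    (pre ++ x :: rest).set pre.length v = pre ++ v :: rest := by
  induction pre with
  | nil => rfl
  | cons a t ih => simp [ih]

-- A's fold over the enumerated texts fills the replicate list with pvG, position by position.
lemma foldlA_fill (st : List (List String)) (ts : List String) (pre : List Int) :
    (PySem.List.enumerate ts (pre.length : Int)).foldl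
      (fun labels p =>
        match pvLabelA (PySem.Str.lower p.2) (PySem.List.enumerate st 0) with
        | some ti => labels.set p.1.toNat ti
        | none => labels)
      (pre ++ List.replicate ts.length (-1 : Int))
    = pre ++ ts.map (pvG st) := by
  induction ts generalizing pre with
  | nil => simp [PySem.List.enumerate_nil]
  | cons t rest ih =>
    rw [PySem.List.enumerate_cons]
    simp only [List.foldl_cons, List.length_cons, List.replicate]
    have hstep :
        (match pvLabelA (PySem.Str.lower t) (PySem.List.enumerate st 0) with
          | some ti => (pre ++ (-1 : Int) :: List.replicate rest.length (-1)).set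
              ((pre.length : Int)).toNat ti
          | none => pre ++ (-1 : Int) :: List.replicate rest.length (-1))
        = (pre ++ [pvG st t]) ++ List.replicate rest.length (-1 : Int) := by
      cases h : pvLabelA (PySem.Str.lower t) (PySem.List.enumerate st 0) with
      | none => simp [pvG, h]
      | some ti =>
        simp only [Int.toNat_natCast]
        rw [set_append_cons]
        simp [pvG, h]
    rw [hstep]
    have hc : ((pre.length : Int) + 1) = (((pre ++ [pvG st t]).length : Nat) : Int) := by simp
    rw [hc, ih (pre ++ [pvG st t])]
    simp

-- first-match over an appended topic list: the left part wins if it matches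
lemma pvLabelA_append (tl : String) (ps qs : List (Int × List String)) :
    pvLabelA tl (ps ++ qs)
    = (match pvLabelA tl ps with | some x => some x | none => pvLabelA tl qs) := by
  induction ps with
  | nil => rfl
  | cons p ps ih =>
    obtain ⟨ti, kws⟩ := p
    simp only [List.cons_append, pvLabelA]
    by_cases h : (kws.any fun kw => PySem.Str.isIn (PySem.Str.lower kw) tl) = true
    · rw [if_pos h, if_pos h]
    · rw [if_neg h, if_neg h, ih]

-- lowering the keywords once, then testing, equals lowering inside the test
lemma pvHit_lower (kws : List String) (tl : String) :
    ((kws.map PySem.Str.lower).any fun kw => PySem.Str.isIn kw tl)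
    = (kws.any fun kw => PySem.Str.isIn (PySem.Str.lower kw) tl) := by
  simp only [List.any_map]; rfl

-- B's inner pass over the filtered worklist: pointwise conditional stamp of the label list,
-- and the kept worklist is the sub-filter of unmatched entries.
lemma innerB_main (ti : Int) (kl : List String) (pred : String → Bool) (ls : List String)
    (pre : List Int) (h : String → Int) (s0 : List (Int × String)) :
    ((PySem.List.enumerate ls (pre.length : Int)).filter (fun q => pred q.2)).foldl
        (pvStep ti kl) (pre ++ ls.map h, s0)
    = (pre ++ ls.map (fun tl => if pred tl && kl.any (fun kw => PySem.Str.isIn kw tl) then ti else h tl),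
       s0 ++ (PySem.List.enumerate ls (pre.length : Int)).filter
              (fun q => pred q.2 && !(kl.any (fun kw => PySem.Str.isIn kw q.2)))) := by
  induction ls generalizing pre h s0 with
  | nil => simp [PySem.List.enumerate_nil]
  | cons tl rest ih =>
    rw [PySem.List.enumerate_cons]
    by_cases hp : pred tl = true
    · by_cases hh : (kl.any fun kw => PySem.Str.isIn kw tl) = true
      · -- stamped: labels cell becomes ti, entry leaves the worklist
        simp only [List.filter_cons, List.foldl_cons, pvStep, List.map_cons, hp, hh,
          Bool.not_true, Bool.and_true, Bool.and_false,
          Bool.false_eq_true, if_true, if_false, Int.toNat_natCast]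
        rw [set_append_cons]
        have hx : pre ++ ti :: rest.map h = (pre ++ [ti]) ++ rest.map h := by simp
        rw [hx]
        have hc : ((pre.length : Int) + 1) = (((pre ++ [ti]).length : Nat) : Int) := by simp
        rw [hc, ih (pre ++ [ti]) h s0]
        simp
      · -- kept: labels cell unchanged, entry appended to the kept worklist
        have hh' : (kl.any fun kw => PySem.Str.isIn kw tl) = false := by simpa using hh
        simp only [List.filter_cons, List.foldl_cons, pvStep, List.map_cons, hp, hh',
          Bool.not_false, Bool.and_true, Bool.and_false,
          Bool.false_eq_true, if_true, if_false]
        have hx : pre ++ h tl :: rest.map h = (pre ++ [h tl]) ++ rest.map h := by simp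
        rw [hx]
        have hc : ((pre.length : Int) + 1) = (((pre ++ [h tl]).length : Nat) : Int) := by simp
        rw [hc, ih (pre ++ [h tl]) h (s0 ++ [((pre.length : Int), tl)])]
        simp
    · -- not on the worklist at all: cell keeps h tl
      have hp' : pred tl = false := by simpa using hp
      simp only [List.filter_cons, List.map_cons, hp', Bool.false_eq_true, if_false]
      have hx : pre ++ h tl :: rest.map h = (pre ++ [h tl]) ++ rest.map h := by simp
      rw [hx]
      have hc : ((pre.length : Int) + 1) = (((pre ++ [h tl]).length : Nat) : Int) := by simp
      rw [hc, ih (pre ++ [h tl]) h s0]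
      simp

-- B's outer worklist loop, with the invariant: labels hold the first match among the topics
-- already processed ('done'), and the worklist holds exactly the unmatched entries.
lemma outerB_main (rest : List (Int × List String)) (done : List (Int × List String))
    (lowered : List String) :
    pvOuterB rest
      (lowered.map (fun tl => (pvLabelA tl done).getD (-1)))
      ((PySem.List.enumerate lowered 0).filter (fun q => (pvLabelA q.2 done).isNone))
    = lowered.map (fun tl => (pvLabelA tl (done ++ rest)).getD (-1)) := by
  induction rest generalizing done with
  | nil => simp [pvOuterB]
  | cons p rest ih =>
    obtain ⟨ti, kws⟩ := p
    simp only [pvOuterB]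
    by_cases hemp : ((PySem.List.enumerate lowered 0).filter
        (fun q => (pvLabelA q.2 done).isNone)).isEmpty = true
    · -- break: every text already matched inside 'done'
      rw [if_pos hemp]
      apply List.map_congr_left
      intro tl htl
      rw [pvLabelA_append]
      obtain ⟨k, hk, hkeq⟩ := List.mem_iff_getElem.mp htl
      have hq : ((0 : Int) + k, lowered[k]) ∈ PySem.List.enumerate lowered 0 := by
        rw [PySem.List.mem_enumerate_iff]
        exact ⟨k, hk, rfl⟩
      rw [List.isEmpty_iff, List.filter_eq_nil_iff] at hemp
      have hns : ¬ ((pvLabelA tl done).isNone = true) := by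
        rw [hkeq] at hq
        simpa using hemp _ hq
      cases hsome : pvLabelA tl done with
      | none => exact absurd (by simp [hsome]) hns
      | some x => simp
    · rw [if_neg hemp]
      have hin := innerB_main ti (kws.map PySem.Str.lower)
        (fun tl => (pvLabelA tl done).isNone) lowered []
        (fun tl => (pvLabelA tl done).getD (-1)) []
      simp only [List.length_nil, Nat.cast_zero, List.nil_append] at hin
      rw [hin]
      have hlab : (lowered.map (fun tl =>
          if (pvLabelA tl done).isNone
              && (kws.map PySem.Str.lower).any (fun kw => PySem.Str.isIn kw tl)
          then ti else (pvLabelA tl done).getD (-1)))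
          = lowered.map (fun tl => (pvLabelA tl (done ++ [(ti, kws)])).getD (-1)) := by
        apply List.map_congr_left
        intro tl _
        rw [pvLabelA_append, pvHit_lower]
        cases hsome : pvLabelA tl done with
        | some x => simp
        | none =>
          simp only [Option.isNone_none, Bool.true_and, pvLabelA]
          cases hb : (kws.any fun kw => PySem.Str.isIn (PySem.Str.lower kw) tl) <;> simp
      have hpend : ((PySem.List.enumerate lowered 0).filter
            (fun q => (pvLabelA q.2 done).isNone
              && !((kws.map PySem.Str.lower).any (fun kw => PySem.Str.isIn kw q.2))))
          = (PySem.List.enumerate lowered 0).filter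
              (fun q => (pvLabelA q.2 (done ++ [(ti, kws)])).isNone) := by
        apply List.filter_congr
        intro q _
        rw [pvLabelA_append, pvHit_lower]
        cases hsome : pvLabelA q.2 done with
        | some x => simp
        | none =>
          simp only [Option.isNone_none, Bool.true_and, pvLabelA]
          cases hb : (kws.any fun kw => PySem.Str.isIn (PySem.Str.lower kw) q.2) <;> simp
      rw [hlab, hpend, ih (done ++ [(ti, kws)])]
      simp

-- ===== VERDICT (by name: the statement is the Claim_ definition above) =====
theorem create_seed_labels_py_spec : Claim_equal_create_seed_labels_py := by
  intro texts seed_topics _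
  unfold Spec_create_seed_labels_py create_seed_labels_py create_seed_labels_py_alt
  have hA := foldlA_fill seed_topics texts []
  simp only [List.length_nil, List.nil_append, Nat.cast_zero] at hA
  rw [hA]
  have hB := outerB_main (PySem.List.enumerate seed_topics 0) [] (texts.map PySem.Str.lower)
  have hrep : (texts.map PySem.Str.lower).map
      (fun tl => (pvLabelA tl ([] : List (Int × List String))).getD (-1))
      = List.replicate texts.length (-1 : Int) := by
    rw [List.map_map]
    simp [pvLabelA, Function.comp_def]
  have hfil : ((PySem.List.enumerate (texts.map PySem.Str.lower) 0).filter
      (fun q => (pvLabelA q.2 ([] : List (Int × List String))).isNone))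
      = PySem.List.enumerate (texts.map PySem.Str.lower) 0 := by
    apply List.filter_eq_self.mpr
    intro q _
    simp [pvLabelA]
  rw [hrep, hfil] at hB
  rw [hB, List.nil_append, List.map_map]
  apply List.map_congr_left
  intro t _
  rfl
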